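-- pv_equiv track=rewrite | github.com/som-shahlab/slurmtool | src/print_resources.py | parse_gpu_info
-- ===== SOURCE A (Python) =====
-- def parse_gpu_info(gpu_info):
--     if gpu_info == 'Unknown':
--         return 'N/A', 'N/A', 'N/A'
--     parts = gpu_info.split(',')
--     gpu_type = parts[0].replace('_', ' ')
--     gpu_mem = next((p.split(':')[1] for p in parts if 'GPU_MEM' in p), 'N/A')
--     gpu_cc = next((p.split(':')[1] for p in parts if 'GPU_CC' in p), 'N/A')
--     return gpu_type, gpu_mem, gpu_cc
-- ===== SOURCE B (Python) =====
-- def parse_gpu_info(gpu_info):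
--     if gpu_info == 'Unknown':
--         return 'N/A', 'N/A', 'N/A'
--
--     def field(key):
--         i = gpu_info.find(key)
--         if i < 0:
--             return 'N/A'
--         start = gpu_info[:i].rfind(',') + 1
--         stop = gpu_info.find(',', i)
--         if stop < 0:
--             stop = len(gpu_info)
--         return gpu_info[start:stop].split(':')[1]
--
--     e = gpu_info.find(',')
--     head = gpu_info if e < 0 else gpu_info[:e]
--     return head.replace('_', ' '), field('GPU_MEM'), field('GPU_CC')
-- ===== Notes on version B (the rewrite author's own statement) =====
-- stated objective: alternative
-- what changed: B never builds the comma-separated parts list for the markers: it locates each marker with str.find on the raw string and reconstructs the enclosing field by index arithmetic (rfind of the previous comma, find of the next comma, one slice), instead of A's split(',') followed by generator scans over the parts.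
import Mathlib
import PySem

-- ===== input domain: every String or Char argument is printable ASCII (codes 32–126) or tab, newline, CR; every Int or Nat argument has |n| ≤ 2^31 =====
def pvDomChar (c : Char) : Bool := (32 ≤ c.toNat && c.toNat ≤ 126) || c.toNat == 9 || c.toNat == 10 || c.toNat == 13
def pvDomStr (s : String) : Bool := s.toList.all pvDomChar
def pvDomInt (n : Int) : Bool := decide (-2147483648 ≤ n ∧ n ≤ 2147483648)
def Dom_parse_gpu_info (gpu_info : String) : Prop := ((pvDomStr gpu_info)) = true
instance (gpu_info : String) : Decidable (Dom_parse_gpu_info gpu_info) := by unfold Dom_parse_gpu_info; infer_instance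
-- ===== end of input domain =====

-- B avoids A's split(',')-and-scan: it locates each marker with find on the raw string and
-- rebuilds the enclosing field by index arithmetic (previous comma via rfind, next comma via
-- find, one slice) — an alternative algorithm of the same cost.

-- ===== PORT A =====
def parse_gpu_info (gpu_info : String) : String × String × String :=
  if gpu_info = "Unknown" then ("N/A", "N/A", "N/A")
  else
    let parts := ((PySem.Str.split? gpu_info ",").getD [])
    let gpu_type := PySem.Str.replace ((PySem.List.pyGet? parts 0).getD "") "_" " "
    -- next((p.split(':')[1] for p in parts if 'GPU_MEM' in p), 'N/A'); pyGet? = none is the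
    -- IndexError (part with marker but no ':'), excluded by Pre_ below
    let gpu_mem := match parts.find? (fun p => PySem.Str.isIn "GPU_MEM" p) with
      | some p => (PySem.List.pyGet? (((PySem.Str.split? p ":").getD [])) 1).getD ""
      | none => "N/A"
    let gpu_cc := match parts.find? (fun p => PySem.Str.isIn "GPU_CC" p) with
      | some p => (PySem.List.pyGet? (((PySem.Str.split? p ":").getD [])) 1).getD ""
      | none => "N/A"
    (gpu_type, gpu_mem, gpu_cc)

-- ===== PORT B =====
-- field(key): find the marker in the raw string, cut the enclosing comma-field out by index
-- arithmetic, take what follows its first ':' ( split(':')[1]; pyGet? = none is the IndexError,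
-- excluded by Pre_ below )
def pvField (gpu_info : String) (key : String) : String :=
  let i := PySem.Str.find gpu_info key
  if i < 0 then "N/A"
  else
    let start := PySem.Str.rfind (PySem.Str.slice gpu_info none (some i)) "," + 1
    let stop0 := PySem.Str.findFrom gpu_info "," i none
    let stop := if stop0 < 0 then PySem.Str.len gpu_info else stop0
    (PySem.List.pyGet?
      (((PySem.Str.split? (PySem.Str.slice gpu_info (some start) (some stop)) ":").getD [])) 1).getD ""

def parse_gpu_info_alt (gpu_info : String) : String × String × String :=
  if gpu_info = "Unknown" then ("N/A", "N/A", "N/A")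
  else
    let e := PySem.Str.find gpu_info ","
    let head := if e < 0 then gpu_info else PySem.Str.slice gpu_info none (some e)
    (PySem.Str.replace head "_" " ", pvField gpu_info "GPU_MEM", pvField gpu_info "GPU_CC")

-- ===== PRECONDITION & SPEC =====
-- Pre_ excludes exactly the inputs where Python A raises IndexError: a first comma-field
-- containing 'GPU_MEM' (resp. 'GPU_CC') that has no ':' (then split(':')[1] fails); B's
-- Python raises the same IndexError there.
def Pre_parse_gpu_info (gpu_info : String) : Prop :=
  gpu_info = "Unknown" ∨
    (((((PySem.Str.split? gpu_info ",").getD [])).find? (fun p => PySem.Str.isIn "GPU_MEM" p)).all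
        (fun p => PySem.Str.isIn ":" p) = true ∧
     ((((PySem.Str.split? gpu_info ",").getD [])).find? (fun p => PySem.Str.isIn "GPU_CC" p)).all
        (fun p => PySem.Str.isIn ":" p) = true)
instance (gpu_info : String) : Decidable (Pre_parse_gpu_info gpu_info) := by
  unfold Pre_parse_gpu_info; infer_instance

def pvWitness_parse_gpu_info : String := "a_b,GPU_MEM:16,GPU_CC:6"

def Spec_parse_gpu_info (gpu_info : String) (out : String × String × String) : Prop := out = parse_gpu_info_alt gpu_info
instance (gpu_info : String) (out : String × String × String) : Decidable (Spec_parse_gpu_info gpu_info out) := by unfold Spec_parse_gpu_info; infer_instance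

-- ===== CLAIM (what is proved, stated in full; the proofs are below) =====
def Claim_equal_parse_gpu_info : Prop := ∀ (gpu_info : String), Dom_parse_gpu_info gpu_info → Pre_parse_gpu_info gpu_info → Spec_parse_gpu_info gpu_info (parse_gpu_info gpu_info)

-- ===== LEMMAS AND PROOFS =====

def pvSplitc (c : Char) : List Char → List (List Char)
  | [] => [[]]
  | x :: r => if x = c then [] :: pvSplitc c r else (pvSplitc c r).modifyHead (x :: ·)

theorem pvSplitc_ne_nil (c : Char) (s : List Char) : pvSplitc c s ≠ [] := by
  cases s with
  | nil => simp [pvSplitc]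
  | cons x r =>
    by_cases h : x = c <;> simp [pvSplitc, h]
    intro hc; exact pvSplitc_ne_nil c r (by simpa using congrArg List.length hc)

theorem pvSplitOn_go_eq (c : Char) (fuel : Nat) :
    ∀ (s cur : List Char) (acc : List (List Char)), s.length < fuel →
    PySem.Chars.splitOn.go [c] fuel s cur acc
      = acc.reverse ++ (pvSplitc c s).modifyHead (cur.reverse ++ ·) := by
  induction fuel with
  | zero => intro s cur acc h; exact absurd h (by omega)
  | succ f ih =>
    intro s cur acc h
    cases s with
    | nil => simp [PySem.Chars.splitOn.go, pvSplitc]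
    | cons x r =>
      rw [PySem.Chars.splitOn.go]
      by_cases hx : x = c
      · subst hx
        have hpre : [x].isPrefixOf (x :: r) = true := by simp [List.isPrefixOf]
        rw [if_pos hpre]
        rw [ih _ _ _ (by simpa using Nat.lt_of_succ_lt_succ h)]
        simp only [pvSplitc]
        cases hr : pvSplitc x r <;> simp [List.modifyHead, hr]
      · have hpre : [c].isPrefixOf (x :: r) = false := by
          simp [List.isPrefixOf]; exact fun hh => absurd hh.symm hx
        rw [if_neg (by simp [hpre])]
        rw [ih _ _ _ (by simpa using Nat.lt_of_succ_lt_succ h)]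
        have hne := pvSplitc_ne_nil c r
        cases hr : pvSplitc c r with
        | nil => exact absurd hr hne
        | cons p t => simp [pvSplitc, hx, hr]

theorem pvSplitOn_eq (c : Char) (s : List Char) :
    PySem.Chars.splitOn s [c] = pvSplitc c s := by
  rw [PySem.Chars.splitOn, pvSplitOn_go_eq c (s.length+1) s [] [] (by omega)]
  cases h : pvSplitc c s with
  | nil => exact absurd h (pvSplitc_ne_nil c s)
  | cons p t => simp

theorem pvSplitc_no_sep {c : Char} {s : List Char} (h : c ∉ s) : pvSplitc c s = [s] := by
  induction s with
  | nil => rfl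
  | cons x r ih =>
    have hx : x ≠ c := fun hh => h (hh ▸ List.mem_cons_self)
    simp [pvSplitc, hx, ih (fun hm => h (List.mem_cons_of_mem _ hm))]

theorem pvSplitc_append {c : Char} {a : List Char} (r : List Char) (h : c ∉ a) :
    pvSplitc c (a ++ c :: r) = a :: pvSplitc c r := by
  induction a with
  | nil => simp [pvSplitc]
  | cons x t ih =>
    have hx : x ≠ c := fun hh => h (hh ▸ List.mem_cons_self)
    simp [pvSplitc, hx, ih (fun hm => h (List.mem_cons_of_mem _ hm))]

theorem pvComma_decomp (c : Char) (s : List Char) :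
    c ∉ s ∨ ∃ a r, s = a ++ c :: r ∧ c ∉ a := by
  by_cases h : c ∈ s
  · right
    have hd : s.dropWhile (· ≠ c) ≠ [] := by
      intro hnil
      have : s.takeWhile (· ≠ c) = s := by
        have := List.takeWhile_append_dropWhile (p := (· ≠ c)) (l := s)
        rw [hnil] at this; simpa using this
      have := List.mem_takeWhile_imp (l := s) (p := (· ≠ c)) (this ▸ h)
      simp at this
    obtain ⟨x, t, hxt⟩ := List.exists_cons_of_ne_nil hd
    have hx : x = c := by
      have h2 := List.head_dropWhile_not (p := (· ≠ c)) (l := s) hd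
      have h3 : (s.dropWhile (· ≠ c)).head hd = x := by
        have h4 : (s.dropWhile (· ≠ c)).head? = some x := by rw [hxt]; rfl
        rw [List.head?_eq_some_head hd] at h4
        exact Option.some_injective _ h4
      rw [h3] at h2; simpa using h2
    refine ⟨s.takeWhile (· ≠ c), t, ?_, ?_⟩
    · conv_lhs => rw [← List.takeWhile_append_dropWhile (p := (· ≠ c)) (l := s)]
      rw [hxt, hx]
    · intro hm
      have := List.mem_takeWhile_imp (l := s) (p := (· ≠ c)) hm
      simp at this
  · exact Or.inl h

-- [c] is a prefix of l iff l starts with c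
theorem pvSingle_prefix {c : Char} {l : List Char} : [c] <+: l ↔ l[0]? = some c := by
  cases l with
  | nil => simp
  | cons x t => simp [List.cons_prefix_cons]; exact ⟨fun hh => hh.symm, fun hh => hh.symm⟩

theorem pvSingle_prefix_drop {c : Char} {l : List Char} {j : Nat} :
    [c] <+: l.drop j ↔ l[j]? = some c := by
  rw [pvSingle_prefix]
  simp [List.getElem?_drop]

-- first-occurrence introduction for Chars.find
theorem pvFind_intro {s sub : List Char} {n : Nat} (h1 : sub <+: s.drop n)
    (h2 : ∀ j < n, ¬ sub <+: s.drop j) : PySem.Chars.find s sub = n := by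
  have hin : PySem.Chars.isIn sub s = true :=
    (PySem.Chars.exists_prefix_drop_iff_isIn sub s).mp ⟨n, h1⟩
  have hnn : 0 ≤ PySem.Chars.find s sub := by
    rw [PySem.Chars.find_nonneg_iff]
    exact (PySem.Chars.isIn_iff_infix sub s).mp hin
  obtain ⟨hpre, hmin⟩ := PySem.Chars.find_spec hnn
  rcases Nat.lt_trichotomy (PySem.Chars.find s sub).toNat n with hlt | heq | hgt
  · exact absurd hpre (h2 _ hlt)
  · omega
  · exact absurd h1 (hmin n hgt)

theorem pvFind_comma_no {c : Char} {s : List Char} (h : c ∉ s) :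
    PySem.Chars.find s [c] = -1 := by
  rw [PySem.Chars.find_eq_neg_one_iff]
  exact fun hinf => h (hinf.subset List.mem_cons_self)

theorem pvFind_comma_append {c : Char} {a : List Char} (r : List Char) (h : c ∉ a) :
    PySem.Chars.find (a ++ c :: r) [c] = a.length := by
  apply pvFind_intro (n := a.length)
  · rw [pvSingle_prefix_drop]; simp
  · intro j hj
    rw [pvSingle_prefix_drop]
    intro hc
    rw [List.getElem?_append_left hj] at hc
    exact h (List.mem_of_getElem? hc)

-- an occurrence of a separator-free pattern in a ++ c :: r at position j ≤ |a| lies inside a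
theorem pvOcc_split {c : Char} {cs a : List Char} (r : List Char) (hc : c ∉ cs) {j : Nat}
    (hj : j ≤ a.length) :
    cs <+: (a ++ c :: r).drop j ↔ cs <+: a.drop j ∧ j + cs.length ≤ a.length := by
  rw [List.drop_append_of_le_length hj]
  constructor
  · intro hp
    by_cases hlen : cs.length ≤ a.length - j
    · constructor
      · exact List.prefix_of_prefix_length_le hp (List.prefix_append _ _) (by simp; omega)
      · omega
    · exfalso
      have hlt : a.length - j < cs.length := by omega
      have hget := hp.getElem (i := a.length - j) hlt
      have hlen2 : (a.drop j).length = a.length - j := by simp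
      have hcc : (a.drop j ++ c :: r)[a.length - j]'(by
          simp only [List.length_append, List.length_drop, List.length_cons]; omega) = c := by
        rw [List.getElem_append_right (by omega)]
        simp [hlen2]
      exact hc (hcc ▸ hget ▸ List.getElem_mem hlt)
  · intro ⟨hp, _⟩
    exact hp.trans (List.prefix_append _ _)

theorem pvDrop_append_big {c : Char} {a r : List Char} {j : Nat} (h : a.length < j) :
    (a ++ c :: r).drop j = r.drop (j - a.length - 1) := by
  rw [List.drop_append, List.drop_eq_nil_of_le (by omega),
    show j - a.length = (j - a.length - 1) + 1 by omega]
  simp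

theorem pvFindA {c : Char} {cs a : List Char} (r : List Char) (hc : c ∉ cs)
    (h : PySem.Chars.isIn cs a = true) :
    PySem.Chars.find (a ++ c :: r) cs = PySem.Chars.find a cs := by
  have hnn : 0 ≤ PySem.Chars.find a cs := by
    rw [PySem.Chars.find_nonneg_iff]; exact (PySem.Chars.isIn_iff_infix cs a).mp h
  obtain ⟨hpre, hmin⟩ := PySem.Chars.find_spec hnn
  set n := (PySem.Chars.find a cs).toNat with hn
  have hnlen : n ≤ a.length := by
    have := PySem.Chars.find_le_length a cs; omega
  have : PySem.Chars.find (a ++ c :: r) cs = n := by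
    apply pvFind_intro
    · rw [List.drop_append_of_le_length hnlen]
      exact hpre.trans (List.prefix_append _ _)
    · intro j hj hp
      have hjle : j ≤ a.length := by omega
      exact hmin j hj ((pvOcc_split r hc hjle).mp hp).1
  omega

theorem pvFindB {c : Char} {cs a : List Char} (r : List Char) (hc : c ∉ cs)
    (h : PySem.Chars.isIn cs a = false) :
    PySem.Chars.find (a ++ c :: r) cs =
      if PySem.Chars.find r cs = -1 then -1 else a.length + 1 + PySem.Chars.find r cs := by
  have hnoa : ∀ j, ¬ cs <+: a.drop j := by
    intro j hp
    have := (PySem.Chars.exists_prefix_drop_iff_isIn cs a).mp ⟨j, hp⟩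
    rw [h] at this; exact absurd this (by simp)
  by_cases hr : PySem.Chars.find r cs = -1
  · rw [if_pos hr]
    rw [PySem.Chars.find_eq_neg_one_iff] at hr ⊢
    intro hinf
    obtain ⟨j, hp⟩ := (PySem.Chars.exists_prefix_drop_iff_isIn cs (a ++ c :: r)).mpr
      ((PySem.Chars.isIn_iff_infix _ _).mpr hinf)
    by_cases hja : j ≤ a.length
    · exact hnoa j ((pvOcc_split r hc hja).mp hp).1
    · rw [pvDrop_append_big (by omega)] at hp
      exact hr ((PySem.Chars.exists_prefix_drop_iff_isIn cs r).mp ⟨_, hp⟩ |>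
        (fun hh => (PySem.Chars.isIn_iff_infix cs r).mp hh))
  · rw [if_neg hr]
    have hnn : 0 ≤ PySem.Chars.find r cs := by
      rcases (PySem.Chars.neg_one_le_find r cs).lt_or_eq with h1 | h1
      · omega
      · exact absurd h1.symm hr
    obtain ⟨hpre, hmin⟩ := PySem.Chars.find_spec hnn
    set m := (PySem.Chars.find r cs).toNat with hm
    have : PySem.Chars.find (a ++ c :: r) cs = (a.length + 1 + m : Nat) := by
      apply pvFind_intro
      · rw [pvDrop_append_big (by omega)]
        have : a.length + 1 + m - a.length - 1 = m := by omega
        rw [this]; exact hpre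
      · intro j hj hp
        by_cases hja : j ≤ a.length
        · exact hnoa j ((pvOcc_split r hc hja).mp hp).1
        · rw [pvDrop_append_big (by omega)] at hp
          exact hmin _ (by omega) hp
    rw [this]; push_cast; omega

-- index of the last occurrence of c (-1 if absent) — model of Python's rfind for one char
def pvLastIdx (c : Char) : List Char → Int
  | [] => -1
  | x :: t => if 0 ≤ pvLastIdx c t then pvLastIdx c t + 1 else if x = c then 0 else -1

theorem pvLastIdx_ge (c : Char) (s : List Char) : -1 ≤ pvLastIdx c s := by
  cases s with
  | nil => simp [pvLastIdx]
  | cons x t =>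
    have := pvLastIdx_ge c t
    simp only [pvLastIdx]
    split_ifs <;> omega

theorem pvLastIdx_no {c : Char} {s : List Char} (h : c ∉ s) : pvLastIdx c s = -1 := by
  induction s with
  | nil => rfl
  | cons x t ih =>
    have hx : x ≠ c := fun hh => h (hh ▸ List.mem_cons_self)
    have ht := ih (fun hm => h (List.mem_cons_of_mem _ hm))
    simp [pvLastIdx, ht, hx]

theorem pvLastIdx_snoc (c x : Char) (l : List Char) :
    pvLastIdx c (l ++ [x]) = if x = c then (l.length : Int) else pvLastIdx c l := by
  induction l with
  | nil => by_cases hx : x = c <;> simp [pvLastIdx, hx]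
  | cons y t ih =>
    by_cases hx : x = c
    · subst hx
      have ht : 0 ≤ pvLastIdx x (t ++ [x]) := by rw [ih]; simp
      simp only [List.cons_append, pvLastIdx, ih, List.length_cons]
      split_ifs <;> omega
    · simp only [List.cons_append, pvLastIdx, ih, if_neg hx]
  
theorem pvLastIdx_append {c : Char} {a : List Char} (t : List Char) (h : c ∉ a) :
    pvLastIdx c (a ++ c :: t) =
      if pvLastIdx c t < 0 then (a.length : Int) else a.length + 1 + pvLastIdx c t := by
  induction a with
  | nil =>
    simp only [List.nil_append, pvLastIdx, List.length_nil]
    split_ifs <;> omega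
  | cons y b ih =>
    have hy : y ≠ c := fun hh => h (hh ▸ List.mem_cons_self)
    have hb := ih (fun hm => h (List.mem_cons_of_mem _ hm))
    have hge : 0 ≤ pvLastIdx c (b ++ c :: t) := by
      rw [hb]; split_ifs <;> omega
    simp only [List.cons_append, pvLastIdx, hb, List.length_cons]
    split_ifs <;> push_cast <;> omega

-- bridge: Chars.rfind with a single-character needle is pvLastIdx
theorem pvRfind_go_eq (c : Char) (s : List Char) :
    ∀ k, k ≤ s.length → PySem.Chars.rfind.go s [c] k = pvLastIdx c (s.take (k + 1)) := by
  intro k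
  induction k with
  | zero =>
    intro hk
    rw [PySem.Chars.rfind.go]
    cases s with
    | nil => simp [pvLastIdx, List.isPrefixOf]
    | cons x t =>
      by_cases hx : x = c
      · subst hx; simp [List.isPrefixOf, pvLastIdx]
      · have : [c].isPrefixOf (x :: t) = false := by
          simp [List.isPrefixOf]; exact fun hh => absurd hh.symm hx
        simp [this, pvLastIdx, hx]
  | succ j ih =>
    intro hk
    rw [PySem.Chars.rfind.go]
    have hj1 : j + 1 < s.length ∨ j + 1 = s.length := by omega
    have htake : s.take (j + 2) = s.take (j + 1) ++ (s.drop (j+1)).take 1 := by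
      rw [← List.take_add]
    cases hj1 with
    | inl hlt =>
      have hget : s.drop (j+1) = s[j+1] :: s.drop (j+2) := by
        rw [List.drop_eq_getElem_cons hlt]
      by_cases hc : s[j+1] = c
      · have hpre : [c].isPrefixOf (s.drop (j+1)) = true := by
          rw [hget, hc]; simp [List.isPrefixOf]
        rw [if_pos hpre, htake, hget]
        simp only [List.take_succ_cons, List.take_zero]
        rw [pvLastIdx_snoc, if_pos hc]
        simp [List.length_take, Nat.min_eq_left (by omega)]
      · have hpre : [c].isPrefixOf (s.drop (j+1)) = false := by
          rw [hget]; simp [List.isPrefixOf]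
          exact fun hh => absurd hh.symm hc
        rw [if_neg (by simp [hpre]), ih (by omega), htake, hget]
        simp only [List.take_succ_cons, List.take_zero]
        rw [pvLastIdx_snoc, if_neg hc]
    | inr heq =>
      have hdrop : s.drop (j+1) = [] := by rw [List.drop_eq_nil_iff]; omega
      have hpre : [c].isPrefixOf (s.drop (j+1)) = false := by rw [hdrop]; rfl
      rw [if_neg (by simp [hpre]), ih (by omega)]
      rw [List.take_of_length_le (by omega), List.take_of_length_le (by omega)]

theorem pvRfind_eq (c : Char) (s : List Char) :
    PySem.Chars.rfind s [c] = pvLastIdx c s := by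
  rw [PySem.Chars.rfind, pvRfind_go_eq c s s.length (le_refl _),
    List.take_of_length_le (by omega)]

-- B's start index expression, at list level
def pvStartL (s : List Char) (i : Int) : Int :=
  PySem.Chars.rfind (PySem.List.slice s none (some i)) [','] + 1
-- B's stop index expression, at list level
def pvStopL (s : List Char) (i : Int) : Int :=
  if PySem.Chars.findFrom s [','] i none < 0 then (s.length : Int)
  else PySem.Chars.findFrom s [','] i none

-- the master equivalence on a comma-free string
theorem pvGrab_nocomma (cs : List Char) (s : List Char) (hns : (',' : Char) ∉ s) :
    (pvSplitc ',' s).find? (fun p => PySem.Chars.isIn cs p)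
      = (if PySem.Chars.find s cs < 0 then none
         else some (PySem.List.slice s
            (some (pvStartL s (PySem.Chars.find s cs)))
            (some (pvStopL s (PySem.Chars.find s cs))))) := by
  rw [pvSplitc_no_sep hns]
  by_cases hin : PySem.Chars.isIn cs s = true
  · have hnn : 0 ≤ PySem.Chars.find s cs := by
      rw [PySem.Chars.find_nonneg_iff]; exact (PySem.Chars.isIn_iff_infix cs s).mp hin
    rw [if_neg (by omega), List.find?_cons_of_pos (by simpa using hin)]
    set i := (PySem.Chars.find s cs).toNat with hi
    have hfi : PySem.Chars.find s cs = (i : Int) := by omega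
    have hile : i ≤ s.length := by
      have := PySem.Chars.find_le_length s cs; omega
    have hstart : pvStartL s (PySem.Chars.find s cs) = 0 := by
      rw [pvStartL, PySem.List.slice_to _ hnn, pvRfind_eq,
        pvLastIdx_no (fun hm => hns ((List.take_sublist _ _).subset hm))]
      omega
    have hstop : pvStopL s (PySem.Chars.find s cs) = (s.length : Int) := by
      rw [pvStopL, hfi, PySem.Chars.findFrom_natCast s [','] i hile,
        pvFind_comma_no (fun hm => hns ((List.drop_sublist _ _).subset hm))]
      simp
    rw [hstart, hstop, PySem.List.slice_toNat _ (by omega) (by omega)]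
    simp
  · have hfneg : PySem.Chars.find s cs = -1 := by
      rw [PySem.Chars.find_eq_neg_one_iff]
      intro hinf
      exact hin ((PySem.Chars.isIn_iff_infix cs s).mpr hinf)
    rw [if_pos (by omega), List.find?_cons_of_neg (by simpa using hin)]
    simp

theorem pvGrab_eq (cs : List Char) (h2 : (',' : Char) ∉ cs) :
    ∀ (n : Nat) (s : List Char), s.length ≤ n →
    (pvSplitc ',' s).find? (fun p => PySem.Chars.isIn cs p)
      = (if PySem.Chars.find s cs < 0 then none
         else some (PySem.List.slice s
            (some (pvStartL s (PySem.Chars.find s cs)))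
            (some (pvStopL s (PySem.Chars.find s cs))))) := by
  intro n
  induction n with
  | zero =>
    intro s hs
    have hnil : s = [] := by cases s <;> simp_all
    exact hnil ▸ pvGrab_nocomma cs [] (by simp)
  | succ m ih =>
    intro s hs
    rcases pvComma_decomp ',' s with hns | ⟨a, r, hsar, hna⟩
    · exact pvGrab_nocomma cs s hns
    · subst hsar
      rw [pvSplitc_append r hna]
      by_cases hina : PySem.Chars.isIn cs a = true
      · -- first field already contains the marker
        rw [List.find?_cons_of_pos (by simpa using hina)]
        have hfa := pvFindA r h2 hina
        have hnn : 0 ≤ PySem.Chars.find a cs := by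
          rw [PySem.Chars.find_nonneg_iff]; exact (PySem.Chars.isIn_iff_infix cs a).mp hina
        set ia := (PySem.Chars.find a cs).toNat with hia
        have hfi : PySem.Chars.find a cs = (ia : Int) := by omega
        have hiale : ia ≤ a.length := by
          have := PySem.Chars.find_le_length a cs; omega
        have hstart : pvStartL (a ++ ',' :: r) (PySem.Chars.find (a ++ ',' :: r) cs) = 0 := by
          rw [pvStartL, hfa, PySem.List.slice_to _ hnn, hfi]
          rw [Int.toNat_natCast, List.take_append_of_le_length hiale, pvRfind_eq,
            pvLastIdx_no (fun hm => hna ((List.take_sublist _ _).subset hm))]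
          omega
        have hstop : pvStopL (a ++ ',' :: r) (PySem.Chars.find (a ++ ',' :: r) cs)
            = (a.length : Int) := by
          rw [pvStopL, hfa, hfi,
            PySem.Chars.findFrom_natCast _ [','] ia (by simp; omega),
            List.drop_append_of_le_length hiale,
            pvFind_comma_append r (fun hm => hna ((List.drop_sublist _ _).subset hm))]
          have : ((a.drop ia).length : Int) = (a.length : Int) - ia := by simp; omega
          rw [this]
          split_ifs with hh <;> omega
        rw [if_neg (by omega), hstart, hstop, PySem.List.slice_toNat _ (by omega) (by omega)]
        simp [List.take_append_of_le_length (le_refl a.length)]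
      · -- marker not in the first field: recurse on r
        rw [List.find?_cons_of_neg (by simpa using hina)]
        have hfb := pvFindB r h2 (by simpa using hina)
        have hlen : r.length ≤ m := by simp at hs; omega
        rw [ih r hlen]
        by_cases hrneg : PySem.Chars.find r cs = -1
        · rw [if_pos (by omega), if_pos (by rw [hfb, if_pos hrneg]; omega)]
        · have hrnn : 0 ≤ PySem.Chars.find r cs := by
            have := PySem.Chars.neg_one_le_find r cs; omega
          set irn := (PySem.Chars.find r cs).toNat with hirn
          have hfir : PySem.Chars.find r cs = (irn : Int) := by omega
          have hirle : irn ≤ r.length := by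
            have := PySem.Chars.find_le_length r cs; omega
          have hfs : PySem.Chars.find (a ++ ',' :: r) cs
              = ((a.length + 1 + irn : Nat) : Int) := by
            rw [hfb, if_neg hrneg, hfir]; push_cast; ring
          rw [if_neg (by omega), if_neg (by rw [hfs]; omega)]
          -- start indices
          have htake : (a ++ ',' :: r).take (a.length + 1 + irn)
              = a ++ ',' :: r.take irn := by
            rw [List.take_append, List.take_of_length_le (by omega),
              show a.length + 1 + irn - a.length = irn + 1 by omega, List.take_succ_cons]
          have hstart : pvStartL (a ++ ',' :: r) (PySem.Chars.find (a ++ ',' :: r) cs)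
              = (a.length : Int) + 1 + pvStartL r (PySem.Chars.find r cs) := by
            rw [pvStartL, pvStartL, hfs, hfir, PySem.List.slice_to _ (by omega),
              PySem.List.slice_to _ (by omega), Int.toNat_natCast, Int.toNat_natCast,
              htake, pvRfind_eq, pvRfind_eq, pvLastIdx_append _ hna]
            have hgt := pvLastIdx_ge ',' (List.take irn r)
            split_ifs with hh <;> omega
          have hstop : pvStopL (a ++ ',' :: r) (PySem.Chars.find (a ++ ',' :: r) cs)
              = (a.length : Int) + 1 + pvStopL r (PySem.Chars.find r cs) := by
            rw [pvStopL, pvStopL, hfs, hfir,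
              PySem.Chars.findFrom_natCast _ [','] (a.length + 1 + irn) (by simp; omega),
              PySem.Chars.findFrom_natCast _ [','] irn hirle,
              pvDrop_append_big (by omega)]
            rw [show a.length + 1 + irn - a.length - 1 = irn by omega]
            have hfd := PySem.Chars.neg_one_le_find (List.drop irn r) [',']
            simp only [List.length_append, List.length_cons]
            split_ifs <;> push_cast <;> omega
          rw [hstart, hstop]
          -- the slice of s collapses to the slice of r
          congr 1
          have hs0 : 0 ≤ pvStartL r (PySem.Chars.find r cs) := by
            rw [pvStartL, pvRfind_eq]
            have := pvLastIdx_ge ',' (PySem.List.slice r none (some (PySem.Chars.find r cs)))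
            omega
          have hp0 : 0 ≤ pvStopL r (PySem.Chars.find r cs) := by
            rw [pvStopL]
            split_ifs with hh
            · omega
            · omega
          rw [PySem.List.slice_toNat (a ++ ',' :: r) (by omega) (by omega),
            PySem.List.slice_toNat r hs0 hp0]
          have h1' : ((a.length : Int) + 1 + pvStartL r (PySem.Chars.find r cs)).toNat
              = a.length + 1 + (pvStartL r (PySem.Chars.find r cs)).toNat := by omega
          rw [h1', pvDrop_append_big (by omega)]
          have h2' : a.length + 1 + (pvStartL r (PySem.Chars.find r cs)).toNat - a.length - 1
              = (pvStartL r (PySem.Chars.find r cs)).toNat := by omega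
          rw [h2']
          congr 1
          omega

-- the first comma-field is everything before the first comma
theorem pvHead_eq (s : List Char) :
    ∃ t, pvSplitc ',' s
      = (if PySem.Chars.find s [','] < 0 then s
         else s.take (PySem.Chars.find s [',']).toNat) :: t := by
  rcases pvComma_decomp ',' s with hns | ⟨a, r, hsar, hna⟩
  · refine ⟨[], ?_⟩
    rw [pvSplitc_no_sep hns, pvFind_comma_no hns, if_pos (by omega)]
  · subst hsar
    refine ⟨pvSplitc ',' r, ?_⟩
    rw [pvSplitc_append r hna, pvFind_comma_append r hna, if_neg (by omega)]
    simp

-- B's field() computes A's first-matching-part extraction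
theorem pvField_eq (s : String) (key : String)
    (h2 : (',' : Char) ∉ key.toList) :
    (match ((pvSplitc ',' s.toList).map String.ofList).find?
        (fun p => PySem.Str.isIn key p) with
      | some p => (PySem.List.pyGet? (((PySem.Str.split? p ":").getD [])) 1).getD ""
      | none => "N/A")
    = pvField s key := by
  rw [List.find?_map]
  have hcomp : ((fun p => PySem.Str.isIn key p) ∘ String.ofList)
      = fun q => PySem.Chars.isIn key.toList q := by
    funext q; simp [PySem.Str.isIn]
  rw [hcomp, pvGrab_eq key.toList h2 s.toList.length s.toList (le_refl _)]
  have hfind : PySem.Str.find s key = PySem.Chars.find s.toList key.toList := rfl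
  have hcomma : ("," : String).toList = [','] := by simp
  by_cases hneg : PySem.Chars.find s.toList key.toList < 0
  · rw [if_pos hneg, pvField, if_pos (hfind ▸ hneg)]
    simp
  · rw [if_neg hneg, pvField, if_neg (hfind ▸ hneg)]
    simp only [Option.map_some]
    have hstart : PySem.Str.rfind (PySem.Str.slice s none (some (PySem.Str.find s key))) "," + 1
        = pvStartL s.toList (PySem.Chars.find s.toList key.toList) := by
      rw [pvStartL, PySem.Str.rfind, PySem.Str.toList_slice, PySem.Chars.slice_eq_listSlice,
        hcomma, hfind]
    have hstop : (if PySem.Str.findFrom s "," (PySem.Str.find s key) none < 0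
          then PySem.Str.len s else PySem.Str.findFrom s "," (PySem.Str.find s key) none)
        = pvStopL s.toList (PySem.Chars.find s.toList key.toList) := by
      rw [pvStopL, PySem.Str.findFrom, PySem.Str.len, hcomma, hfind]
    rw [hstart, hstop]
    have hslice : PySem.Str.slice s
        (some (pvStartL s.toList (PySem.Chars.find s.toList key.toList)))
        (some (pvStopL s.toList (PySem.Chars.find s.toList key.toList)))
        = String.ofList (PySem.List.slice s.toList
            (some (pvStartL s.toList (PySem.Chars.find s.toList key.toList)))
            (some (pvStopL s.toList (PySem.Chars.find s.toList key.toList)))) := by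
      rw [PySem.Str.slice, PySem.Chars.slice_eq_listSlice]
    rw [hslice]

-- ===== VERDICT (by name: the statement is the Claim_ definition above) =====
theorem parse_gpu_info_spec : Claim_equal_parse_gpu_info := by
  intro g _ _
  unfold Spec_parse_gpu_info parse_gpu_info parse_gpu_info_alt
  by_cases hU : g = "Unknown"
  · simp [hU]
  · simp only [hU, if_false]
    have hcomma : ("," : String).toList = [','] := by simp
    have hsplit : (PySem.Str.split? g ",").getD []
        = (pvSplitc ',' g.toList).map String.ofList := by
      rw [PySem.Str.split?, hcomma, PySem.Chars.split?, if_neg (by simp)]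
      simp [pvSplitOn_eq]
    rw [hsplit]
    refine congrArg₂ Prod.mk ?_ (congrArg₂ Prod.mk ?_ ?_)
    · -- gpu_type: first field, '_' replaced by ' '
      obtain ⟨t, ht⟩ := pvHead_eq g.toList
      rw [ht]
      simp only [List.map_cons]
      have hget : (PySem.List.pyGet? (String.ofList
            (if PySem.Chars.find g.toList [','] < 0 then g.toList
             else g.toList.take (PySem.Chars.find g.toList [',']).toNat) :: t.map String.ofList) 0).getD ""
          = String.ofList (if PySem.Chars.find g.toList [','] < 0 then g.toList
             else g.toList.take (PySem.Chars.find g.toList [',']).toNat) := by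
        simp [PySem.List.pyGet?, PySem.List.pyIdx?]
      rw [hget]
      have hfind : PySem.Str.find g "," = PySem.Chars.find g.toList [','] := by
        rw [PySem.Str.find, hcomma]
      congr 1
      by_cases he : PySem.Chars.find g.toList [','] < 0
      · rw [if_pos he, if_pos (by rw [hfind]; exact he)]
        simp
      · rw [if_neg he, if_neg (by rw [hfind]; exact he),
          PySem.Str.slice, PySem.Chars.slice_eq_listSlice,
          PySem.List.slice_to _ (by omega), hfind]
    · exact pvField_eq g "GPU_MEM" (by simp)
    · exact pvField_eq g "GPU_CC" (by simp)
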